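-- pv_equiv track=rewrite | github.com/lbliii/bengal | bengal/cache/utils/bidirectional.py | repair_bidirectional_index
-- ===== SOURCE A (Python) =====
-- def repair_bidirectional_index(
--     forward: dict[str, set[str]],
--     reverse: dict[str, set[str]],
-- ) -> tuple[int, int]:
--     """
--     Repair bidirectional index by rebuilding reverse from forward.
--
--     This is the standard repair strategy: trust the forward index
--     and rebuild the reverse index from scratch.
--
--     Args:
--         forward: Forward index (key → set[pages]) - source of truth
--         reverse: Reverse index (page → set[keys]) - will be rebuilt
--
--     Returns:
--         Tuple of (entries_added, entries_removed) from reverse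
--
--     """
--     # Build expected reverse from forward
--     expected_reverse: dict[str, set[str]] = {}
--     for key, pages in forward.items():
--         for page in pages:
--             if page not in expected_reverse:
--                 expected_reverse[page] = set()
--             expected_reverse[page].add(key)
--
--     # Count changes
--     added = 0
--     removed = 0
--
--     # Remove pages not in expected
--     pages_to_remove = set(reverse.keys()) - set(expected_reverse.keys())
--     for page in pages_to_remove:
--         removed += len(reverse[page])
--         del reverse[page]
--
--     # Add/update pages
--     for page, expected_keys in expected_reverse.items():
--         if page not in reverse:
--             reverse[page] = expected_keys.copy()
--             added += len(expected_keys)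
--         else:
--             current = reverse[page]
--             to_add = expected_keys - current
--             to_remove = current - expected_keys
--             added += len(to_add)
--             removed += len(to_remove)
--             reverse[page] = expected_keys.copy()
--
--     return added, removed
-- ===== SOURCE B (Python) =====
-- def repair_bidirectional_index(
--     forward: dict[str, set[str]],
--     reverse: dict[str, set[str]],
-- ) -> tuple[int, int]:
--     """Pair-counting repair: flatten both indexes to (page, key) pairs and count,
--     instead of diffing per-page sets; rebuilds reverse in place like the original."""
--     # the expected reverse relation, as one flat set of (page, key) pairs
--     pairs = {(page, key) for key, pages in forward.items() for page in pages}
--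
--     total_old = sum(len(keys) for keys in reverse.values())
--     common = sum(1 for page, keys in reverse.items() for key in keys
--                  if (page, key) in pairs)
--
--     # rebuild reverse in place from the pair relation
--     rebuilt: dict[str, set[str]] = {}
--     for page, key in pairs:
--         rebuilt.setdefault(page, set()).add(key)
--     reverse.clear()
--     reverse.update(rebuilt)
--
--     return len(pairs) - common, total_old - common
-- ===== Notes on version B (the rewrite author's own statement) =====
-- stated objective: alternative
-- what changed: Instead of grouping forward into an expected page->keys dict and diffing per-page sets against reverse, B flattens the relation to one set of (page,key) pairs and counts: added = |pairs| - common, removed = total old entries - common, where common counts reverse entries that are also pairs; reverse is rebuilt in place from the pair set. Pre_ restricts the Lean association-list inputs to well-formed dict/set encodings (distinct reverse keys, duplicate-free reverse value lists), since a list with duplicates encodes no Python dict-of-sets input.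
import Mathlib
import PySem

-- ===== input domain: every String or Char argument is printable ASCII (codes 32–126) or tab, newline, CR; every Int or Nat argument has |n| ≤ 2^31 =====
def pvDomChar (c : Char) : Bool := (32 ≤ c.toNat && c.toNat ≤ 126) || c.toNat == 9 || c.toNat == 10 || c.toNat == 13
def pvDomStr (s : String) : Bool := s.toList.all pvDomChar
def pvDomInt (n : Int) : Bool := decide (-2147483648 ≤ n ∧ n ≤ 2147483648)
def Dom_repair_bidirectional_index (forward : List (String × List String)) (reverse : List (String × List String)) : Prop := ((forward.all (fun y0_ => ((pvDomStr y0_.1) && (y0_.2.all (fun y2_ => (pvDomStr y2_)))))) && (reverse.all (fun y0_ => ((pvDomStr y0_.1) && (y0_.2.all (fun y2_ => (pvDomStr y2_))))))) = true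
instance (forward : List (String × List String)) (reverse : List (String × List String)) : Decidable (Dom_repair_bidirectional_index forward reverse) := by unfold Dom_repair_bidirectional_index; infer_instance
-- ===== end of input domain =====

-- B counts (page, key) PAIRS of the flattened relation instead of diffing per-page sets;
-- equivalence is about the RETURN value (both Pythons also rebuild `reverse` in place to the
-- same mapping; that side effect is not part of the value proved equal here).

-- ===== PORT A =====
def repair_bidirectional_index (forward : List (String × List String)) (reverse : List (String × List String)) : Int × Int :=
  -- expected_reverse built key by key, with the explicit "if page not in …: … = set()" guard
  let expected : PySem.Dict String (PySem.Set String) :=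
    forward.foldl (fun er kp =>
      kp.2.foldl (fun er page =>
        let er := if er.contains page then er else er.insert page PySem.Set.empty
        er.insert page (PySem.Set.add (er.getD page PySem.Set.empty) kp.1)) er)
      PySem.Dict.empty
  let rev : PySem.Dict String (PySem.Set String) := PySem.Dict.mk reverse
  let pages_to_remove : PySem.Set String :=
    PySem.Set.diff (PySem.Set.ofList rev.keys) (PySem.Set.ofList expected.keys)
  -- first pass: delete pages not in expected, counting their entries as removed
  let st1 : Int × PySem.Dict String (PySem.Set String) :=
    pages_to_remove.foldl (fun st page =>
      (st.1 + (PySem.Set.len (st.2.getD page PySem.Set.empty) : Int), st.2.erase page)) (0, rev)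
  -- second pass: add / update every expected page
  let st2 : Int × Int × PySem.Dict String (PySem.Set String) :=
    expected.items.foldl (fun st pk =>
      if st.2.2.contains pk.1 = false then
        (st.1 + (PySem.Set.len pk.2 : Int), st.2.1, st.2.2.insert pk.1 pk.2)
      else
        let current := st.2.2.getD pk.1 PySem.Set.empty
        (st.1 + (PySem.Set.len (PySem.Set.diff pk.2 current) : Int),
         st.2.1 + (PySem.Set.len (PySem.Set.diff current pk.2) : Int),
         st.2.2.insert pk.1 pk.2)) (0, st1.1, st1.2)
  (st2.1, st2.2.1)

-- ===== PORT B =====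
-- (Source B's in-place rebuild of `reverse` is a side effect that does not feed the return value;
-- like A's port, only the returned pair is modelled)
def repair_bidirectional_index_alt (forward : List (String × List String)) (reverse : List (String × List String)) : Int × Int :=
  -- pairs = {(page, key) for key, pages in forward.items() for page in pages}
  let pairs : PySem.Set (String × String) :=
    PySem.Set.ofList (forward.flatMap (fun kp => kp.2.map (fun page => (page, kp.1))))
  let rev : PySem.Dict String (List String) := PySem.Dict.mk reverse
  -- total_old = sum(len(keys) for keys in reverse.values())
  let totalOld : Int := rev.values.foldl (fun a ks => a + PySem.List.len ks) 0
  -- common = sum(1 for page, keys in reverse.items() for key in keys if (page, key) in pairs)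
  let common : Int := rev.items.foldl (fun a pk =>
    a + ((pk.2.countP (fun k => PySem.Set.contains pairs (pk.1, k)) : Nat) : Int)) 0
  (PySem.Set.len pairs - common, totalOld - common)

-- ===== PRECONDITION & SPEC =====
-- Pre_ restricts the association-list arguments to well-formed encodings of A's Python input
-- type dict[str, set[str]]: `reverse` has distinct keys and duplicate-free value lists (a list
-- with duplicates encodes no Python dict of sets, so A is never called on such an input).
def Pre_repair_bidirectional_index (forward : List (String × List String)) (reverse : List (String × List String)) : Prop :=
  (reverse.map Prod.fst).Nodup ∧ ∀ pk ∈ reverse, pk.2.Nodup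
instance (forward : List (String × List String)) (reverse : List (String × List String)) : Decidable (Pre_repair_bidirectional_index forward reverse) := by unfold Pre_repair_bidirectional_index; infer_instance

def pvWitness_repair_bidirectional_index : (List (String × List String)) × (List (String × List String)) :=
  ([("k", ["p", "q"])], [("p", ["k", "x"]), ("r", ["k"])])

def Spec_repair_bidirectional_index (forward : List (String × List String)) (reverse : List (String × List String)) (out : Int × Int) : Prop := out = repair_bidirectional_index_alt forward reverse
instance (forward : List (String × List String)) (reverse : List (String × List String)) (out : Int × Int) : Decidable (Spec_repair_bidirectional_index forward reverse out) := by unfold Spec_repair_bidirectional_index; infer_instance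

-- ===== CLAIM (what is proved, stated in full; the proofs are below) =====
def Claim_equal_repair_bidirectional_index : Prop := ∀ (forward : List (String × List String)) (reverse : List (String × List String)), Dom_repair_bidirectional_index forward reverse → Pre_repair_bidirectional_index forward reverse → Spec_repair_bidirectional_index forward reverse (repair_bidirectional_index forward reverse)

-- ===== LEMMAS AND PROOFS =====

-- B's flat (page, key) pair list, before dedup (shorthand used only in the proofs)
def pvPairs (forward : List (String × List String)) : List (String × String) :=
  forward.flatMap (fun kp => kp.2.map (fun page => (page, kp.1)))

-- A's expected-building dict (shorthand used only in the proofs)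
def pvExpected (forward : List (String × List String)) : PySem.Dict String (PySem.Set String) :=
  forward.foldl (fun er kp =>
    kp.2.foldl (fun er page =>
      er.modify page PySem.Set.empty (fun s => PySem.Set.add s kp.1)) er)
    PySem.Dict.empty

-- per-page added / removed contributions of A's passes
def pvGA (forward : List (String × List String)) (reverse : List (String × List String)) (p : String) : Int :=
  PySem.Set.len (PySem.Set.diff ((pvExpected forward).getD p PySem.Set.empty) ((PySem.Dict.mk reverse).getD p PySem.Set.empty))

def pvGR (forward : List (String × List String)) (reverse : List (String × List String)) (p : String) : Int :=
  PySem.Set.len (PySem.Set.diff ((PySem.Dict.mk reverse).getD p PySem.Set.empty) ((pvExpected forward).getD p PySem.Set.empty))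

-- the flat pair list of a dict's items
def pvFlat (l : List (String × List String)) : List (String × String) :=
  l.flatMap (fun pk => pk.2.map (fun k => (pk.1, k)))

-- A's guarded insert step equals the modify step
theorem pv_step_eq (er : PySem.Dict String (PySem.Set String)) (page : String) (key : String) :
    (let er' := if er.contains page then er else er.insert page PySem.Set.empty
     er'.insert page (PySem.Set.add (er'.getD page PySem.Set.empty) key))
    = er.modify page PySem.Set.empty (fun s => PySem.Set.add s key) := by
  by_cases h : er.contains page
  · simp [h, PySem.Dict.modify]
  · have h' : er.contains page = false := by simpa using h
    rw [PySem.Dict.modify, PySem.Dict.getD_of_not_contains er PySem.Set.empty h']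
    simp [h', PySem.Dict.getD_insert_self, PySem.Dict.insert_insert_self]

theorem pv_build_eq (forward : List (String × List String)) :
    forward.foldl (fun er kp =>
      kp.2.foldl (fun er page =>
        let er := if er.contains page then er else er.insert page PySem.Set.empty
        er.insert page (PySem.Set.add (er.getD page PySem.Set.empty) kp.1)) er)
      PySem.Dict.empty = pvExpected forward := by
  unfold pvExpected
  congr 1
  funext er kp
  congr 1
  funext er page
  exact pv_step_eq er page kp.1

theorem pv_nodup_expected_aux (forward : List (String × List String))
    (d : PySem.Dict String (PySem.Set String)) (hd : d.keys.Nodup) :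
    (forward.foldl (fun er kp =>
      kp.2.foldl (fun er page =>
        er.modify page PySem.Set.empty (fun s => PySem.Set.add s kp.1)) er) d).keys.Nodup := by
  induction forward generalizing d with
  | nil => simpa using hd
  | cons kp rest ih =>
    simp only [List.foldl_cons]
    exact ih _ (PySem.Dict.nodup_keys_foldl_modify_key kp.2 (fun p => p) PySem.Set.empty
      (fun _ _ => fun s => PySem.Set.add s kp.1) d hd)

theorem pv_nodup_expected (forward : List (String × List String)) :
    (pvExpected forward).keys.Nodup := by
  exact pv_nodup_expected_aux forward PySem.Dict.empty (by simp [PySem.Dict.keys, PySem.Dict.empty])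

-- membership in the inner page loop's dict
theorem pv_mem_getD_inner (pages : List String) (key : String)
    (d : PySem.Dict String (PySem.Set String)) (p k : String) :
    k ∈ (pages.foldl (fun er page =>
        er.modify page PySem.Set.empty (fun s => PySem.Set.add s key)) d).getD p PySem.Set.empty
    ↔ k ∈ d.getD p PySem.Set.empty ∨ (k = key ∧ p ∈ pages) := by
  induction pages generalizing d with
  | nil => simp
  | cons q rest ih =>
    simp only [List.foldl_cons, ih, PySem.Dict.getD_modify, List.mem_cons]
    by_cases hpq : p = q
    · subst hpq
      simp only [if_true, PySem.Set.mem_add]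
      tauto
    · simp only [if_neg hpq]
      tauto

-- membership in expected's per-page set ↔ membership in the flat pair list
theorem pv_mem_getD_build (forward : List (String × List String))
    (d : PySem.Dict String (PySem.Set String)) (p k : String) :
    k ∈ (forward.foldl (fun er kp =>
        kp.2.foldl (fun er page =>
          er.modify page PySem.Set.empty (fun s => PySem.Set.add s kp.1)) er) d).getD p PySem.Set.empty
    ↔ k ∈ d.getD p PySem.Set.empty ∨ (p, k) ∈ pvPairs forward := by
  induction forward generalizing d with
  | nil => simp [pvPairs]
  | cons kp rest ih =>
    simp only [List.foldl_cons, ih, pv_mem_getD_inner, pvPairs, List.flatMap_cons,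
      List.mem_append, List.mem_map]
    constructor
    · rintro (((h | ⟨hk, hp⟩) | h))
      · exact Or.inl h
      · exact Or.inr (Or.inl ⟨p, hp, by simp [hk]⟩)
      · exact Or.inr (Or.inr h)
    · rintro (h | ⟨q, hq, he⟩ | h)
      · exact Or.inl (Or.inl h)
      · obtain ⟨rfl, rfl⟩ : q = p ∧ kp.1 = k := by
          constructor <;> [exact congrArg Prod.fst he; exact congrArg Prod.snd he]
        exact Or.inl (Or.inr ⟨rfl, hq⟩)
      · exact Or.inr h

theorem pv_mem_expected (forward : List (String × List String)) (p k : String) :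
    k ∈ (pvExpected forward).getD p PySem.Set.empty ↔ (p, k) ∈ pvPairs forward := by
  rw [pvExpected, pv_mem_getD_build]
  simp [PySem.Dict.getD_empty, PySem.Set.empty]

-- every per-page set of expected is duplicate-free
theorem pv_nodup_getD_inner (pages : List String) (key : String)
    (d : PySem.Dict String (PySem.Set String)) (h : ∀ p, (d.getD p PySem.Set.empty).Nodup) (p : String) :
    ((pages.foldl (fun er page =>
        er.modify page PySem.Set.empty (fun s => PySem.Set.add s key)) d).getD p PySem.Set.empty).Nodup := by
  induction pages generalizing d with
  | nil => exact h p
  | cons q rest ih =>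
    simp only [List.foldl_cons]
    refine ih _ (fun p' => ?_)
    rw [PySem.Dict.getD_modify]
    by_cases hpq : p' = q
    · have hadd : (PySem.Set.add (d.getD q PySem.Set.empty) key).Nodup := by
        by_cases hm : key ∈ d.getD q PySem.Set.empty
        · rw [PySem.Set.add_of_mem hm]; exact h q
        · rw [PySem.Set.add_of_not_mem hm]
          simp only [List.nodup_append]
          simp
          exact ⟨h q, fun a ha hak => hm (hak ▸ ha)⟩
      simpa [hpq] using hadd
    · simpa [hpq] using h p'

theorem pv_nodup_getD_expected (forward : List (String × List String)) (p : String) :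
    ((pvExpected forward).getD p PySem.Set.empty).Nodup := by
  rw [pvExpected]
  have : ∀ (d : PySem.Dict String (PySem.Set String)),
      (∀ p, (d.getD p PySem.Set.empty).Nodup) → ∀ p,
      ((forward.foldl (fun er kp =>
        kp.2.foldl (fun er page =>
          er.modify page PySem.Set.empty (fun s => PySem.Set.add s kp.1)) er) d).getD p PySem.Set.empty).Nodup := by
    induction forward with
    | nil => intro d h p; exact h p
    | cons kp rest ih =>
      intro d h p
      simp only [List.foldl_cons]
      exact ih _ (fun p' => pv_nodup_getD_inner kp.2 kp.1 d h p') p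
  exact this PySem.Dict.empty (fun p => by simp [PySem.Dict.getD_empty, PySem.Set.empty]) p

-- the flat pair list of a dict with distinct keys and duplicate-free values is duplicate-free
theorem pv_nodup_flat (l : List (String × List String))
    (hk : (l.map Prod.fst).Nodup) (hv : ∀ pk ∈ l, pk.2.Nodup) : (pvFlat l).Nodup := by
  induction l with
  | nil => simp [pvFlat]
  | cons pk rest ih =>
    simp only [pvFlat, List.flatMap_cons]
    refine List.Nodup.append ?_ (ih (List.nodup_cons.mp (by simpa using hk)).2
      (fun q hq => hv q (List.mem_cons_of_mem _ hq))) ?_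
    · exact (hv pk List.mem_cons_self).map (fun a b h => by
        simpa using congrArg Prod.snd h)
    · intro x hx hx'
      obtain ⟨k, _, rfl⟩ := List.mem_map.mp hx
      obtain ⟨q, hq, hxq⟩ := List.mem_flatMap.mp hx'
      obtain ⟨k', hk', he⟩ := List.mem_map.mp hxq
      have h1 : q.1 = pk.1 := by simpa using congrArg Prod.fst he
      have : pk.1 ∈ rest.map Prod.fst := h1 ▸ List.mem_map_of_mem hq
      exact (List.nodup_cons.mp (by simpa using hk)).1 this

-- membership in the flat pair list of a dict with distinct keys ↔ getD membership
theorem pv_mem_flat_dict (d : PySem.Dict String (List String)) (hnd : d.keys.Nodup) (p k : String) :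
    (p, k) ∈ pvFlat d.items ↔ k ∈ d.getD p PySem.Set.empty := by
  constructor
  · intro h
    simp only [pvFlat] at h
    obtain ⟨pk, hpk, hm⟩ := List.mem_flatMap.mp h
    obtain ⟨k', hk', he⟩ := List.mem_map.mp hm
    have h1 : pk.1 = p := by simpa using congrArg Prod.fst he
    have h2 : k' = k := by simpa using congrArg Prod.snd he
    have hpk' : (p, pk.2) ∈ d.items := by
      rw [← h1]; simpa using hpk
    have hg : d.getD p PySem.Set.empty = pk.2 :=
      PySem.Dict.getD_of_mem_items d hpk' hnd PySem.Set.empty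
    rw [hg]; exact h2 ▸ hk'
  · intro h
    by_cases hc : d.contains p = true
    · have hs : (d.get? p).isSome = true := by
        rw [← PySem.Dict.contains_eq_isSome_get? (d := d) (k := p)]
        exact hc
      obtain ⟨v, hv⟩ := Option.isSome_iff_exists.mp hs
      have hm : (p, v) ∈ d.items := PySem.Dict.mem_items_of_get?_eq_some d hv
      have hg : d.getD p PySem.Set.empty = v := PySem.Dict.getD_of_get?_eq_some d (PySem.Set.empty : List String) hv
      simp only [pvFlat, List.mem_flatMap, List.mem_map]
      exact ⟨(p, v), hm, ⟨k, hg ▸ h, rfl⟩⟩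
    · have hg : d.getD p PySem.Set.empty = PySem.Set.empty :=
        PySem.Dict.getD_of_not_contains d PySem.Set.empty (by simpa using hc)
      rw [hg] at h
      simp [PySem.Set.empty] at h

-- a fold of "acc + countP" is the countP of the flat pair list
theorem pv_foldl_countP_flat (l : List (String × List String)) (q : String → String → Bool) (a : Int) :
    l.foldl (fun a pk => a + ((pk.2.countP (q pk.1) : Nat) : Int)) a
    = a + (((pvFlat l).countP (fun x => q x.1 x.2) : Nat) : Int) := by
  induction l generalizing a with
  | nil => simp [pvFlat]
  | cons pk rest ih =>
    simp only [List.foldl_cons, ih, pvFlat, List.flatMap_cons, List.countP_append,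
      List.countP_map]
    have hc : List.countP ((fun x => q x.1 x.2) ∘ fun k => (pk.1, k)) pk.2
        = List.countP (q pk.1) pk.2 := List.countP_congr (fun a _ => Iff.rfl)
    rw [hc]; push_cast; ring

-- the map-sum form of the same fact
theorem pv_sum_countP_flat (l : List (String × List String)) (q : String → String → Bool) :
    (l.map (fun pk => ((pk.2.countP (q pk.1) : Nat) : Int))).sum
    = (((pvFlat l).countP (fun x => q x.1 x.2) : Nat) : Int) := by
  induction l with
  | nil => simp [pvFlat]
  | cons pk rest ih =>
    simp only [List.map_cons, List.sum_cons, ih, pvFlat, List.flatMap_cons, List.countP_append,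
      List.countP_map]
    have hc : List.countP ((fun x => q x.1 x.2) ∘ fun k => (pk.1, k)) pk.2
        = List.countP (q pk.1) pk.2 := List.countP_congr (fun a _ => Iff.rfl)
    rw [hc]; push_cast; ring

-- counting the complement
theorem pv_countP_not {α : Type} (l : List α) (c : α → Bool) :
    l.countP (fun k => !(c k)) + l.countP c = l.length := by
  induction l with
  | nil => simp
  | cons x xs ih =>
    simp only [List.countP_cons, List.length_cons]
    by_cases h : c x = true <;> simp [h] <;> omega

-- ----- A-side closed form (deletion pass, then add/update pass) -----

theorem pv_find?_filter_ne {κ ν : Type} [BEq κ] [LawfulBEq κ] (l : List (κ × ν)) (k k' : κ) (h : k' ≠ k) :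
    (l.filter (fun p => !(p.1 == k))).find? (fun p => p.1 == k') = l.find? (fun p => p.1 == k') := by
  induction l with
  | nil => rfl
  | cons hd tl ih =>
    by_cases hk : hd.1 = k
    · have e1 : (hd.1 == k) = true := by simp [hk]
      have e2 : (hd.1 == k') = false := by
        simp only [beq_eq_false_iff_ne, ne_eq, hk]
        exact fun e => h e.symm
      simp [e1, e2, ih]
    · have e1 : (hd.1 == k) = false := by simp [hk]
      by_cases hk' : hd.1 = k'
      · have e2 : (hd.1 == k') = true := by simp [hk']
        simp [e1, e2]
      · have e2 : (hd.1 == k') = false := by simp [hk']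
        simp [e1, e2, ih]

theorem pv_get?_erase {κ ν : Type} [BEq κ] [LawfulBEq κ] (d : PySem.Dict κ ν) (k k' : κ) (h : k' ≠ k) :
    (d.erase k).get? k' = d.get? k' := by
  simp only [PySem.Dict.erase, PySem.Dict.get?]
  rw [pv_find?_filter_ne d.items k k' h]

theorem pv_getD_erase {κ ν : Type} [BEq κ] [LawfulBEq κ] (d : PySem.Dict κ ν) (k k' : κ) (d0 : ν) (h : k' ≠ k) :
    (d.erase k).getD k' d0 = d.getD k' d0 := by
  rw [PySem.Dict.getD_eq_get?_getD, PySem.Dict.getD_eq_get?_getD, pv_get?_erase d k k' h]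

theorem pv_contains_erase {κ ν : Type} [BEq κ] [LawfulBEq κ] (d : PySem.Dict κ ν) (k k' : κ) (h : k' ≠ k) :
    (d.erase k).contains k' = d.contains k' := by
  rw [PySem.Dict.contains_eq_isSome_get?, PySem.Dict.contains_eq_isSome_get?,
    pv_get?_erase d k k' h]

theorem pv_getD_foldl_erase (ps : List String) (d : PySem.Dict String (PySem.Set String))
    (p : String) (hp : p ∉ ps) :
    (ps.foldl (fun d q => d.erase q) d).getD p PySem.Set.empty = d.getD p PySem.Set.empty := by
  induction ps generalizing d with
  | nil => rfl
  | cons q rest ih =>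
    simp only [List.foldl_cons]
    rw [ih _ (fun hm => hp (List.mem_cons_of_mem q hm)),
      pv_getD_erase d q p PySem.Set.empty (fun e => hp (e ▸ List.mem_cons_self))]

theorem pv_contains_foldl_erase (ps : List String) (d : PySem.Dict String (PySem.Set String))
    (p : String) (hp : p ∉ ps) :
    (ps.foldl (fun d q => d.erase q) d).contains p = d.contains p := by
  induction ps generalizing d with
  | nil => rfl
  | cons q rest ih =>
    simp only [List.foldl_cons]
    rw [ih _ (fun hm => hp (List.mem_cons_of_mem q hm)),
      pv_contains_erase d q p (fun e => hp (e ▸ List.mem_cons_self))]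

theorem pv_phase1 (ps : List String) (hnd : ps.Nodup) (a : Int) (d : PySem.Dict String (PySem.Set String)) :
    ps.foldl (fun st page =>
        (st.1 + (PySem.Set.len (st.2.getD page PySem.Set.empty) : Int), st.2.erase page)) (a, d)
      = (a + (ps.map (fun p => PySem.Set.len (d.getD p PySem.Set.empty))).sum,
         ps.foldl (fun d q => d.erase q) d) := by
  induction ps generalizing a d with
  | nil => simp
  | cons q rest ih =>
    have hq : q ∉ rest := (List.nodup_cons.mp hnd).1
    simp only [List.foldl_cons, List.map_cons, List.sum_cons]
    rw [ih (List.nodup_cons.mp hnd).2]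
    have : (rest.map (fun p => PySem.Set.len ((d.erase q).getD p PySem.Set.empty))).sum
        = (rest.map (fun p => PySem.Set.len (d.getD p PySem.Set.empty))).sum := by
      congr 1
      apply List.map_congr_left
      intro p hp
      rw [pv_getD_erase d q p PySem.Set.empty (fun e => hq (e ▸ hp))]
    rw [this]
    ring_nf

theorem pv_phase2 (its : List (String × PySem.Set String)) (hnd : (its.map (fun pk => pk.1)).Nodup)
    (a r : Int) (d : PySem.Dict String (PySem.Set String)) :
    its.foldl (fun st pk =>
        if st.2.2.contains pk.1 = false then
          (st.1 + (PySem.Set.len pk.2 : Int), st.2.1, st.2.2.insert pk.1 pk.2)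
        else
          let current := st.2.2.getD pk.1 PySem.Set.empty
          (st.1 + (PySem.Set.len (PySem.Set.diff pk.2 current) : Int),
           st.2.1 + (PySem.Set.len (PySem.Set.diff current pk.2) : Int),
           st.2.2.insert pk.1 pk.2)) (a, r, d)
      = (a + (its.map (fun pk => if d.contains pk.1 then
                PySem.Set.len (PySem.Set.diff pk.2 (d.getD pk.1 PySem.Set.empty))
              else PySem.Set.len pk.2)).sum,
         r + (its.map (fun pk => if d.contains pk.1 then
                PySem.Set.len (PySem.Set.diff (d.getD pk.1 PySem.Set.empty) pk.2)
              else 0)).sum,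
         its.foldl (fun d pk => d.insert pk.1 pk.2) d) := by
  induction its generalizing a r d with
  | nil => simp
  | cons pk rest ih =>
    have hq : pk.1 ∉ rest.map (fun pk => pk.1) := (List.nodup_cons.mp hnd).1
    have hcongrA : (rest.map (fun qk => if (d.insert pk.1 pk.2).contains qk.1 then
          PySem.Set.len (PySem.Set.diff qk.2 ((d.insert pk.1 pk.2).getD qk.1 PySem.Set.empty))
        else PySem.Set.len qk.2))
        = (rest.map (fun qk => if d.contains qk.1 then
          PySem.Set.len (PySem.Set.diff qk.2 (d.getD qk.1 PySem.Set.empty))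
        else PySem.Set.len qk.2)) := by
      apply List.map_congr_left
      intro qk hqk
      have hne : qk.1 ≠ pk.1 := fun e => hq (e ▸ List.mem_map_of_mem hqk)
      rw [PySem.Dict.contains_insert, PySem.Dict.getD_insert_of_ne d pk.2 PySem.Set.empty hne]
      simp [hne]
    have hcongrR : (rest.map (fun qk => if (d.insert pk.1 pk.2).contains qk.1 then
          PySem.Set.len (PySem.Set.diff ((d.insert pk.1 pk.2).getD qk.1 PySem.Set.empty) qk.2)
        else 0))
        = (rest.map (fun qk => if d.contains qk.1 then
          PySem.Set.len (PySem.Set.diff (d.getD qk.1 PySem.Set.empty) qk.2)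
        else 0)) := by
      apply List.map_congr_left
      intro qk hqk
      have hne : qk.1 ≠ pk.1 := fun e => hq (e ▸ List.mem_map_of_mem hqk)
      rw [PySem.Dict.contains_insert, PySem.Dict.getD_insert_of_ne d pk.2 PySem.Set.empty hne]
      simp [hne]
    by_cases hc : d.contains pk.1 = true
    · simp only [List.foldl_cons]
      rw [if_neg (by simp [hc])]
      rw [ih (by simpa using (List.nodup_cons.mp hnd).2)]
      rw [hcongrA, hcongrR, List.map_cons, List.sum_cons, List.map_cons, List.sum_cons]
      rw [if_pos hc, if_pos hc]
      refine congrArg₂ _ (by ring) (congrArg₂ _ (by ring) rfl)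
    · have hc' : d.contains pk.1 = false := by simpa using hc
      simp only [List.foldl_cons]
      rw [if_pos hc']
      rw [ih (by simpa using (List.nodup_cons.mp hnd).2)]
      rw [hcongrA, hcongrR, List.map_cons, List.sum_cons, List.map_cons, List.sum_cons]
      rw [if_neg (by simp [hc']), if_neg (by simp [hc'])]
      refine congrArg₂ _ (by ring) (congrArg₂ _ (by ring) rfl)

theorem pv_diff_empty (s : PySem.Set String) : PySem.Set.diff s PySem.Set.empty = s := by
  simp [PySem.Set.diff]

theorem pv_nodup_keys_list (forward : List (String × List String)) :
    ((pvExpected forward).items.map (fun pk => pk.1)).Nodup := by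
  simpa [PySem.Dict.keys] using pv_nodup_expected forward

-- closed form of A's port
theorem pv_A_closed (forward : List (String × List String)) (reverse : List (String × List String)) :
    repair_bidirectional_index forward reverse
      = (((pvExpected forward).keys.map (pvGA forward reverse)).sum,
         ((PySem.Set.diff (PySem.Set.ofList (PySem.Dict.mk reverse : PySem.Dict String (PySem.Set String)).keys)
              (PySem.Set.ofList (pvExpected forward).keys)).map (pvGR forward reverse)).sum
           + ((pvExpected forward).keys.map (pvGR forward reverse)).sum) := by
  have hEk : (pvExpected forward).keys.Nodup := pv_nodup_expected forward
  simp only [repair_bidirectional_index]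
  rw [pv_build_eq]
  rw [pv_phase1 _ (PySem.Set.nodup_diff _ _ (PySem.Set.nodup_ofList _)) 0 _]
  simp only []
  rw [pv_phase2 _ (pv_nodup_keys_list forward) _ _ _]
  simp only []
  set E := pvExpected forward with hE
  set rev : PySem.Dict String (PySem.Set String) := PySem.Dict.mk reverse with hrev
  set D := PySem.Set.diff (PySem.Set.ofList rev.keys) (PySem.Set.ofList E.keys) with hDdef
  have hmemD : ∀ p ∈ D, p ∉ E.keys := by
    intro p hp hq
    exact ((PySem.Set.mem_diff _ _ p).mp hp).2 ((PySem.Set.mem_ofList _ p).mpr hq)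
  have hkeyD : ∀ pk ∈ E.items, pk.1 ∉ D := by
    intro pk hpk hp
    exact hmemD _ hp (by
      have : pk.1 ∈ E.items.map (fun pk => pk.1) := List.mem_map_of_mem hpk
      simpa [PySem.Dict.keys] using this)
  have hmapA : (E.items.map (fun pk => if (D.foldl (fun d q => d.erase q) rev).contains pk.1 then
        PySem.Set.len (PySem.Set.diff pk.2 ((D.foldl (fun d q => d.erase q) rev).getD pk.1 PySem.Set.empty))
      else PySem.Set.len pk.2))
      = E.items.map (fun pk => pvGA forward reverse pk.1) := by
    apply List.map_congr_left
    intro pk hpk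
    rw [pv_contains_foldl_erase D rev pk.1 (hkeyD pk hpk),
      pv_getD_foldl_erase D rev pk.1 (hkeyD pk hpk)]
    have hget : E.getD pk.1 PySem.Set.empty = pk.2 :=
      PySem.Dict.getD_of_mem_items E hpk hEk PySem.Set.empty
    by_cases hc : rev.contains pk.1 = true
    · simp only [hc, if_pos, pvGA, ← hE, ← hrev, hget]
    · have hc' : rev.contains pk.1 = false := by simpa using hc
      rw [if_neg (by simp [hc'])]
      simp only [pvGA, ← hE, ← hrev, hget, PySem.Dict.getD_of_not_contains rev PySem.Set.empty hc',
        pv_diff_empty]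
  have hmapR : (E.items.map (fun pk => if (D.foldl (fun d q => d.erase q) rev).contains pk.1 then
        PySem.Set.len (PySem.Set.diff ((D.foldl (fun d q => d.erase q) rev).getD pk.1 PySem.Set.empty) pk.2)
      else 0))
      = E.items.map (fun pk => pvGR forward reverse pk.1) := by
    apply List.map_congr_left
    intro pk hpk
    rw [pv_contains_foldl_erase D rev pk.1 (hkeyD pk hpk),
      pv_getD_foldl_erase D rev pk.1 (hkeyD pk hpk)]
    have hget : E.getD pk.1 PySem.Set.empty = pk.2 :=
      PySem.Dict.getD_of_mem_items E hpk hEk PySem.Set.empty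
    by_cases hc : rev.contains pk.1 = true
    · simp only [hc, if_pos, pvGR, ← hE, ← hrev, hget]
    · have hc' : rev.contains pk.1 = false := by simpa using hc
      rw [if_neg (by simp [hc'])]
      simp only [pvGR, ← hE, ← hrev, hget, PySem.Dict.getD_of_not_contains rev PySem.Set.empty hc']
      rfl
  have hmapD : (D.map (fun p => PySem.Set.len (rev.getD p PySem.Set.empty)))
      = D.map (pvGR forward reverse) := by
    apply List.map_congr_left
    intro p hp
    have hnc : E.contains p = false := by
      cases hEc : E.contains p
      · rfl
      · exact absurd ((PySem.Dict.contains_iff_mem_keys E p).mp hEc) (hmemD p hp)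
    simp only [pvGR, ← hE, ← hrev, PySem.Dict.getD_of_not_contains E PySem.Set.empty hnc,
      pv_diff_empty]
  have hitems : (E.items.map (fun pk => pvGA forward reverse pk.1)).sum
      = (E.keys.map (pvGA forward reverse)).sum := by
    simp only [PySem.Dict.keys, List.map_map]
    rfl
  have hitemsR : (E.items.map (fun pk => pvGR forward reverse pk.1)).sum
      = (E.keys.map (pvGR forward reverse)).sum := by
    simp only [PySem.Dict.keys, List.map_map]
    rfl
  rw [hmapA, hmapR, hmapD, hitems, hitemsR]
  simp

-- sum over a dict's items of "how many of pk.2 fail test c", in flat form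
theorem pv_sum_gcount (l : List (String × List String)) (c : String → String → Bool) :
    (l.map (fun pk => ((pk.2.countP (fun k => !(c pk.1 k)) : Nat) : Int))).sum
    = ((pvFlat l).length : Int) - (((pvFlat l).countP (fun x => c x.1 x.2) : Nat) : Int) := by
  have h1 := pv_sum_countP_flat l (fun p k => !(c p k))
  have h2 := pv_countP_not (pvFlat l) (fun x => c x.1 x.2)
  have h3 := @List.countP_le_length _ (fun x => c x.1 x.2) (pvFlat l)
  rw [h1]
  omega

-- B's total_old sum equals the flat pair count of reverse
theorem pv_totalOld (l : List (String × List String)) (a : Int) :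
    (l.map (fun x => x.2)).foldl (fun a ks => a + (ks.length : Int)) a
    = a + ((pvFlat l).length : Int) := by
  induction l generalizing a with
  | nil => simp [pvFlat]
  | cons pk rest ih =>
    simp only [List.map_cons, List.foldl_cons, ih, pvFlat, List.flatMap_cons,
      List.length_append, List.length_map]
    push_cast
    ring

-- every value stored in expected is duplicate-free
theorem pv_nodup_items_expected (forward : List (String × List String)) :
    ∀ pk ∈ (pvExpected forward).items, pk.2.Nodup := by
  intro pk hpk
  have hg := PySem.Dict.getD_of_mem_items (pvExpected forward) hpk (pv_nodup_expected forward)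
    PySem.Set.empty
  rw [← hg]
  exact pv_nodup_getD_expected forward pk.1

-- dedup of the pair list is exactly the flat pair list of expected
theorem pv_pairs_perm (forward : List (String × List String)) :
    (PySem.Set.ofList (pvPairs forward)).Perm (pvFlat (pvExpected forward).items) := by
  have hFE : (pvFlat (pvExpected forward).items).Nodup :=
    pv_nodup_flat _ (pv_nodup_expected forward) (pv_nodup_items_expected forward)
  refine (List.perm_ext_iff_of_nodup (PySem.Set.nodup_ofList _) hFE).mpr ?_
  intro x
  obtain ⟨p, k⟩ := x
  rw [PySem.Set.mem_ofList, ← pv_mem_expected forward p k,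
    pv_mem_flat_dict (pvExpected forward) (pv_nodup_expected forward) p k]

-- the symmetric double count: expected entries present in reverse = reverse entries present in expected
theorem pv_cross (forward reverse : List (String × List String))
    (hknd : (reverse.map Prod.fst).Nodup) (hvnd : ∀ pk ∈ reverse, pk.2.Nodup) :
    (pvFlat (pvExpected forward).items).countP
      (fun x => PySem.Set.contains ((PySem.Dict.mk reverse : PySem.Dict String (List String)).getD x.1 PySem.Set.empty) x.2)
    = (pvFlat reverse).countP
      (fun x => PySem.Set.contains ((pvExpected forward).getD x.1 PySem.Set.empty) x.2) := by
  have hFE : (pvFlat (pvExpected forward).items).Nodup :=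
    pv_nodup_flat _ (pv_nodup_expected forward) (pv_nodup_items_expected forward)
  have hFR : (pvFlat reverse).Nodup := pv_nodup_flat reverse hknd hvnd
  rw [List.countP_eq_length_filter, List.countP_eq_length_filter]
  refine List.Perm.length_eq ?_
  refine (List.perm_ext_iff_of_nodup (List.Nodup.filter _ hFE) (List.Nodup.filter _ hFR)).mpr ?_
  intro x
  obtain ⟨p, k⟩ := x
  rw [List.mem_filter, List.mem_filter,
    pv_mem_flat_dict (pvExpected forward) (pv_nodup_expected forward) p k,
    pv_mem_flat_dict (PySem.Dict.mk reverse) hknd p k,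
    PySem.Set.contains_iff, PySem.Set.contains_iff]
  tauto

-- closed form of B's port
theorem pv_B_closed (forward reverse : List (String × List String)) :
    repair_bidirectional_index_alt forward reverse
    = (PySem.Set.len (PySem.Set.ofList (pvPairs forward))
         - (((pvFlat reverse).countP
              (fun x => PySem.Set.contains (PySem.Set.ofList (pvPairs forward)) (x.1, x.2)) : Nat) : Int),
       ((pvFlat reverse).length : Int)
         - (((pvFlat reverse).countP
              (fun x => PySem.Set.contains (PySem.Set.ofList (pvPairs forward)) (x.1, x.2)) : Nat) : Int)) := by
  have h1 : (PySem.Dict.mk reverse : PySem.Dict String (List String)).values.foldl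
      (fun a ks => a + PySem.List.len ks) 0 = 0 + ((pvFlat reverse).length : Int) :=
    pv_totalOld reverse 0
  have h2 : (PySem.Dict.mk reverse : PySem.Dict String (List String)).items.foldl
      (fun a pk => a + ((pk.2.countP
        (fun k => PySem.Set.contains (PySem.Set.ofList (pvPairs forward)) (pk.1, k)) : Nat) : Int)) 0
      = 0 + (((pvFlat reverse).countP
          (fun x => PySem.Set.contains (PySem.Set.ofList (pvPairs forward)) (x.1, x.2)) : Nat) : Int) :=
    pv_foldl_countP_flat reverse
      (fun p k => PySem.Set.contains (PySem.Set.ofList (pvPairs forward)) (p, k)) 0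
  simp only [repair_bidirectional_index_alt, ← pvPairs.eq_def]
  rw [h1, h2]
  simp

-- A's added count in flat form
theorem pv_added_eq (forward reverse : List (String × List String)) :
    ((pvExpected forward).keys.map (pvGA forward reverse)).sum
    = ((pvFlat (pvExpected forward).items).length : Int)
      - (((pvFlat (pvExpected forward).items).countP
           (fun x => PySem.Set.contains
             ((PySem.Dict.mk reverse : PySem.Dict String (List String)).getD x.1 PySem.Set.empty) x.2) : Nat) : Int) := by
  have hEnd := pv_nodup_expected forward
  have hkeys : (pvExpected forward).keys.map (pvGA forward reverse)
      = (pvExpected forward).items.map (fun pk => pvGA forward reverse pk.1) := by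
    simp only [PySem.Dict.keys, List.map_map]
    rfl
  rw [hkeys]
  have hmap : (pvExpected forward).items.map (fun pk => pvGA forward reverse pk.1)
      = (pvExpected forward).items.map (fun pk =>
          ((pk.2.countP (fun k => !(PySem.Set.contains
            ((PySem.Dict.mk reverse : PySem.Dict String (List String)).getD pk.1 PySem.Set.empty) k)) : Nat) : Int)) := by
    apply List.map_congr_left
    intro pk hpk
    have hget : (pvExpected forward).getD pk.1 PySem.Set.empty = pk.2 :=
      PySem.Dict.getD_of_mem_items _ hpk hEnd PySem.Set.empty
    simp only [pvGA, hget, PySem.Set.diff, PySem.Set.len, List.countP_eq_length_filter]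
  rw [hmap]
  exact pv_sum_gcount (pvExpected forward).items
    (fun p k => PySem.Set.contains
      ((PySem.Dict.mk reverse : PySem.Dict String (List String)).getD p PySem.Set.empty) k)

-- A's removed count (deleted pages plus per-page updates) in flat form
theorem pv_removed_eq (forward reverse : List (String × List String))
    (hknd : (reverse.map Prod.fst).Nodup) :
    ((PySem.Set.diff (PySem.Set.ofList (PySem.Dict.mk reverse : PySem.Dict String (PySem.Set String)).keys)
        (PySem.Set.ofList (pvExpected forward).keys)).map (pvGR forward reverse)).sum
      + ((pvExpected forward).keys.map (pvGR forward reverse)).sum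
    = ((pvFlat reverse).length : Int)
      - (((pvFlat reverse).countP
           (fun x => PySem.Set.contains ((pvExpected forward).getD x.1 PySem.Set.empty) x.2) : Nat) : Int) := by
  have hEnd := pv_nodup_expected forward
  have hknd' : (PySem.Dict.mk reverse : PySem.Dict String (PySem.Set String)).keys.Nodup := hknd
  have hofr : PySem.Set.ofList (PySem.Dict.mk reverse : PySem.Dict String (PySem.Set String)).keys
      = (PySem.Dict.mk reverse : PySem.Dict String (PySem.Set String)).keys :=
    PySem.Set.ofList_eq_self_of_nodup _ hknd'
  set gR := pvGR forward reverse with hgR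
  set rk := (PySem.Dict.mk reverse : PySem.Dict String (PySem.Set String)).keys with hrk
  set pE : String → Bool := fun x => PySem.Set.contains (PySem.Set.ofList (pvExpected forward).keys) x with hpE
  -- the deletion pass is the filter of rk by "not an expected page"
  have hD : PySem.Set.diff (PySem.Set.ofList rk) (PySem.Set.ofList (pvExpected forward).keys)
      = rk.filter (fun x => !(pE x)) := by
    rw [hofr]
    rfl
  -- split the reverse keys by membership in expected
  have hsplit : ((rk.filter pE).map gR).sum + ((rk.filter (fun x => !(pE x))).map gR).sum
      = (rk.map gR).sum := by
    have hperm := (List.filter_append_perm pE rk).map gR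
    have := hperm.sum_eq
    simpa [List.map_append, List.sum_append] using this
  -- expected pages missing from reverse contribute 0 removals
  have hzero : ((( pvExpected forward).keys.filter
        (fun p => !(PySem.Set.contains (PySem.Set.ofList rk) p))).map gR).sum = 0 := by
    have : ∀ p ∈ (pvExpected forward).keys.filter
        (fun p => !(PySem.Set.contains (PySem.Set.ofList rk) p)), gR p = 0 := by
      intro p hp
      obtain ⟨-, hc⟩ := List.mem_filter.mp hp
      have hnm : p ∉ rk := by simpa [PySem.Set.mem_ofList] using hc
      have hcf : (PySem.Dict.mk reverse : PySem.Dict String (PySem.Set String)).contains p = false := by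
        cases hcc : (PySem.Dict.mk reverse : PySem.Dict String (PySem.Set String)).contains p
        · rfl
        · exact absurd ((PySem.Dict.contains_iff_mem_keys _ p).mp hcc) hnm
      rw [hgR]
      simp only [pvGR, PySem.Dict.getD_of_not_contains _ PySem.Set.empty hcf]
      rfl
    calc (((pvExpected forward).keys.filter
          (fun p => !(PySem.Set.contains (PySem.Set.ofList rk) p))).map gR).sum
        = (((pvExpected forward).keys.filter
          (fun p => !(PySem.Set.contains (PySem.Set.ofList rk) p))).map (fun _ => (0 : Int))).sum := by
          rw [List.map_congr_left this]
      _ = 0 := by simp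
  -- the expected pages present in reverse are, as a set, the reverse pages present in expected
  have hswap : (((pvExpected forward).keys.filter
        (fun p => PySem.Set.contains (PySem.Set.ofList rk) p)).map gR).sum
      = ((rk.filter pE).map gR).sum := by
    have hperm : ((pvExpected forward).keys.filter
        (fun p => PySem.Set.contains (PySem.Set.ofList rk) p)).Perm (rk.filter pE) := by
      refine (List.perm_ext_iff_of_nodup (List.Nodup.filter _ hEnd) (List.Nodup.filter _ hknd')).mpr ?_
      intro p
      rw [List.mem_filter, List.mem_filter, hpE]
      constructor
      · rintro ⟨hpe, hc⟩
        have hmem : p ∈ rk := (PySem.Set.mem_ofList _ _).mp ((PySem.Set.contains_iff _ _).mp hc)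
        exact ⟨hmem, (PySem.Set.contains_iff _ _).mpr ((PySem.Set.mem_ofList _ _).mpr hpe)⟩
      · rintro ⟨hmem, hc⟩
        have hpe : p ∈ (pvExpected forward).keys :=
          (PySem.Set.mem_ofList _ _).mp ((PySem.Set.contains_iff _ _).mp hc)
        exact ⟨hpe, (PySem.Set.contains_iff _ _).mpr ((PySem.Set.mem_ofList _ _).mpr hmem)⟩
    exact (hperm.map gR).sum_eq
  -- split expected keys the same way
  have hsplitE : ((pvExpected forward).keys.map gR).sum
      = (((pvExpected forward).keys.filter
            (fun p => PySem.Set.contains (PySem.Set.ofList rk) p)).map gR).sum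
        + (((pvExpected forward).keys.filter
            (fun p => !(PySem.Set.contains (PySem.Set.ofList rk) p))).map gR).sum := by
    have hperm := (List.filter_append_perm
      (fun p => PySem.Set.contains (PySem.Set.ofList rk) p) (pvExpected forward).keys).map gR
    have h := hperm.sum_eq
    rw [List.map_append, List.sum_append] at h
    exact h.symm
  -- total over all reverse keys, in flat form
  have htotal : (rk.map gR).sum
      = ((pvFlat reverse).length : Int)
        - (((pvFlat reverse).countP
             (fun x => PySem.Set.contains ((pvExpected forward).getD x.1 PySem.Set.empty) x.2) : Nat) : Int) := by
    have hitems : rk.map gR = reverse.map (fun pk => gR pk.1) := by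
      rw [hrk]
      simp only [PySem.Dict.keys, List.map_map]
      rfl
    have hmap : reverse.map (fun pk => gR pk.1)
        = reverse.map (fun pk =>
            ((pk.2.countP (fun k => !(PySem.Set.contains
              ((pvExpected forward).getD pk.1 PySem.Set.empty) k)) : Nat) : Int)) := by
      apply List.map_congr_left
      intro pk hpk
      have hget : (PySem.Dict.mk reverse : PySem.Dict String (PySem.Set String)).getD pk.1 PySem.Set.empty = pk.2 :=
        PySem.Dict.getD_of_mem_items _ hpk hknd' PySem.Set.empty
      rw [hgR]
      simp only [pvGR, hget, PySem.Set.diff, PySem.Set.len, List.countP_eq_length_filter]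
    rw [hitems, hmap]
    exact pv_sum_gcount reverse
      (fun p k => PySem.Set.contains ((pvExpected forward).getD p PySem.Set.empty) k)
  rw [hD, hsplitE, hzero, hswap]
  rw [add_zero, add_comm ((rk.filter (fun x => !(pE x))).map gR).sum, hsplit, htotal]

-- ===== VERDICT (by name: the statement is the Claim_ definition above) =====
theorem repair_bidirectional_index_spec : Claim_equal_repair_bidirectional_index := by
  intro forward reverse _dom hpre
  obtain ⟨hknd, hvnd⟩ := hpre
  unfold Spec_repair_bidirectional_index
  rw [pv_A_closed, pv_B_closed]
  have hlen : PySem.Set.len (PySem.Set.ofList (pvPairs forward))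
      = ((pvFlat (pvExpected forward).items).length : Int) := by
    simp only [PySem.Set.len]
    exact congrArg _ (pv_pairs_perm forward).length_eq
  have hpred : (pvFlat reverse).countP
        (fun x => PySem.Set.contains (PySem.Set.ofList (pvPairs forward)) (x.1, x.2))
      = (pvFlat reverse).countP
        (fun x => PySem.Set.contains ((pvExpected forward).getD x.1 PySem.Set.empty) x.2) := by
    apply List.countP_congr
    intro x _
    rw [PySem.Set.contains_iff, PySem.Set.contains_iff, PySem.Set.mem_ofList]
    have hx : (x.1, x.2) = x := rfl
    rw [hx, ← pv_mem_expected forward x.1 x.2]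
  rw [hpred, hlen, pv_added_eq forward reverse, pv_removed_eq forward reverse hknd,
    pv_cross forward reverse hknd hvnd]
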